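-- pv_equiv track=rewrite | github.com/ashybulakstroy/AshybulakStroy_chat_LLM_Proxy | app/audio_transcription.py | select_audio_provider
-- ===== SOURCE A (Python) =====
-- DEFAULT_AUDIO_PROVIDER_ORDER = (
--     "groq",
--     "openai",
--     "openrouter",
--     "gemini",
--     "cerebras",
--     "sambanova",
--     "fireworks",
--     "edenai",
-- )
--
-- def select_audio_provider(requested_provider: str | None, available_providers: list[str]) -> str:
--     if not available_providers:
--         raise ValueError("No providers are configured")
--
--     if requested_provider:
--         if requested_provider not in available_providers:
--             raise ValueError(f"Provider '{requested_provider}' is not configured")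
--         return requested_provider
--
--     for provider_name in DEFAULT_AUDIO_PROVIDER_ORDER:
--         if provider_name in available_providers:
--             return provider_name
--     return available_providers[0]
-- ===== SOURCE B (Python) =====
-- DEFAULT_AUDIO_PROVIDER_ORDER = (
--     "groq",
--     "openai",
--     "openrouter",
--     "gemini",
--     "cerebras",
--     "sambanova",
--     "fireworks",
--     "edenai",
-- )
--
-- def select_audio_provider(requested_provider: str | None, available_providers: list[str]) -> str:
--     if not available_providers:
--         raise ValueError("No providers are configured")
--
--     if requested_provider:
--         if requested_provider not in available_providers:
--             raise ValueError(f"Provider '{requested_provider}' is not configured")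
--         return requested_provider
--
--     order_index = {name: i for i, name in enumerate(DEFAULT_AUDIO_PROVIDER_ORDER)}
--     unlisted = len(DEFAULT_AUDIO_PROVIDER_ORDER)
--     return min(available_providers, key=lambda p: order_index.get(p, unlisted))
-- ===== Notes on version B (the rewrite author's own statement) =====
-- stated objective: idiomatic
-- what changed: The priority scan over the fixed order with a membership test per name is replaced by building an index dict over the order once and taking min(available_providers, key=index-or-len) in a single pass; min's first-minimum stability reproduces both the priority choice and the available_providers[0] fallback.
-- outside the precondition, e.g. on select_audio_provider(None, []): A raises ValueError, B raises ValueError; on select_audio_provider('groq', ['openai']): A raises ValueError, B raises ValueError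
import Mathlib
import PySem

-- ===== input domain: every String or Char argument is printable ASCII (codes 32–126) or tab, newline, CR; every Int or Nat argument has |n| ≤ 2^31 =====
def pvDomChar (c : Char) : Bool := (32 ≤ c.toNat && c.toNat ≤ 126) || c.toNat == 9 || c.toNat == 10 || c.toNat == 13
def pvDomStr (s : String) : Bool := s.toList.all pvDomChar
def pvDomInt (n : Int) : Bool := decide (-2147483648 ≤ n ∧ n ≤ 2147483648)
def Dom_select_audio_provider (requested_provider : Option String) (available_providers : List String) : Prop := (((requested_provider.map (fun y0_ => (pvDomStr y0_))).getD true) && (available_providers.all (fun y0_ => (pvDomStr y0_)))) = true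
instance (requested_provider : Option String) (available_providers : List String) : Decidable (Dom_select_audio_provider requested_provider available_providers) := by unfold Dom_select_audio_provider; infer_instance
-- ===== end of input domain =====

-- B replaces A's scan over the fixed priority order (membership test per name) by a single
-- min over available_providers keyed by an index dict built from the order (idiomatic rewrite).


-- ===== PORT A =====
def pvOrder : List String :=
  ["groq", "openai", "openrouter", "gemini", "cerebras", "sambanova", "fireworks", "edenai"]

-- A's 'for provider_name in DEFAULT_AUDIO_PROVIDER_ORDER' loop with the final fallback
def pickA : List String → List String → String
  | [], avail => avail.headD ""          -- available_providers[0] (avail nonempty under the guard)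
  | o :: os, avail => if o ∈ avail then o else pickA os avail

def select_audio_provider (requested_provider : Option String) (available_providers : List String) : String :=
  if available_providers.isEmpty then "" -- Python: raise ValueError (excluded by Pre_)
  else match requested_provider with
    | some s =>
        if s = "" then pickA pvOrder available_providers   -- '' is falsy: falls through
        else if available_providers.contains s then s
        else ""                                            -- Python: raise ValueError (excluded by Pre_)
    | none => pickA pvOrder available_providers

-- ===== PORT B =====
-- {name: i for i, name in enumerate(DEFAULT_AUDIO_PROVIDER_ORDER)}
def pvOrderIndex : PySem.Dict String Int :=
  (PySem.List.enumerate pvOrder).foldl (fun d p => d.insert p.2 p.1) PySem.Dict.empty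

def select_audio_provider_alt (requested_provider : Option String) (available_providers : List String) : String :=
  if available_providers.isEmpty then "" -- Python: raise ValueError (excluded by Pre_)
  else match requested_provider with
    | some s =>
        if s = "" then
          match PySem.List.min? available_providers (fun p => pvOrderIndex.getD p 8) with
          | some m => m
          | none => ""                                     -- unreachable: list nonempty
        else if available_providers.contains s then s
        else ""                                            -- Python: raise ValueError (excluded by Pre_)
    | none =>
        match PySem.List.min? available_providers (fun p => pvOrderIndex.getD p 8) with
        | some m => m
        | none => ""

-- ===== PRECONDITION & SPEC =====
-- Pre_ excludes exactly the inputs where A raises ValueError: an empty provider list, and a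
-- truthy requested provider that is not among the available ones.
def Pre_select_audio_provider (requested_provider : Option String) (available_providers : List String) : Prop :=
  available_providers ≠ [] ∧
    (requested_provider.getD "" = "" ∨ requested_provider.getD "" ∈ available_providers)

instance (requested_provider : Option String) (available_providers : List String) : Decidable (Pre_select_audio_provider requested_provider available_providers) := by unfold Pre_select_audio_provider; infer_instance

def pvWitness_select_audio_provider : Option String × List String := (none, ["openai", "zzz"])

def Spec_select_audio_provider (requested_provider : Option String) (available_providers : List String) (out : String) : Prop := out = select_audio_provider_alt requested_provider available_providers
instance (requested_provider : Option String) (available_providers : List String) (out : String) : Decidable (Spec_select_audio_provider requested_provider available_providers out) := by unfold Spec_select_audio_provider; infer_instance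

-- ===== CLAIM (what is proved, stated in full; the proofs are below) =====
def Claim_equal_select_audio_provider : Prop := ∀ (requested_provider : Option String) (available_providers : List String), Dom_select_audio_provider requested_provider available_providers → Pre_select_audio_provider requested_provider available_providers → Spec_select_audio_provider requested_provider available_providers (select_audio_provider requested_provider available_providers)

-- ===== LEMMAS AND PROOFS =====

-- B's lookup key is the index of p in pvOrder (pvOrder.length = 8 when absent)
theorem key_eq (p : String) : pvOrderIndex.getD p 8 = (pvOrder.idxOf p : Int) := by
  have h : pvOrderIndex = PySem.Dict.mk [("groq", 0), ("openai", 1), ("openrouter", 2),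
      ("gemini", 3), ("cerebras", 4), ("sambanova", 5), ("fireworks", 6), ("edenai", 7)] := by
    decide
  rw [h]
  simp [PySem.Dict.getD, PySem.Dict.get?_mk_cons, pvOrder, List.idxOf_cons]
  split_ifs <;> first | (subst_vars; decide) | simp_all [Bool.cond_eq_if, beq_iff_eq, PySem.Dict.get?]

theorem min?_cons (x : String) (t : List String) (key : String → Int) :
    PySem.List.min? (x :: t) key
      = some (t.foldl (fun b y => if key y < key b then y else b) x) := by
  induction t generalizing x with
  | nil => rfl
  | cons y t ih =>
      simp only [PySem.List.min?, List.foldl] at *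
      by_cases h : key y < key x <;> simp [h, ih]

theorem pickA_singleton (order : List String) (x : String) : pickA order [x] = x := by
  induction order with
  | nil => rfl
  | cons o os ih => by_cases h : o ∈ [x] <;> simp_all [pickA]

theorem pickA_step (order : List String) (x y : String) (t : List String) :
    (order.idxOf y < order.idxOf x → pickA order (x :: y :: t) = pickA order (y :: t)) ∧
    (order.idxOf x ≤ order.idxOf y → pickA order (x :: y :: t) = pickA order (x :: t)) := by
  induction order with
  | nil => exact ⟨fun h => absurd h (by simp), fun _ => rfl⟩
  | cons o os ih =>
      constructor
      · intro hlt
        by_cases hox : o = x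
        · subst hox
          simp [List.idxOf_cons] at hlt
        · by_cases hoy : o = y
          · subst hoy
            simp [pickA, List.mem_cons]
          · have hx : (o :: os).idxOf x = os.idxOf x + 1 := by
              simp [hox]
            have hy : (o :: os).idxOf y = os.idxOf y + 1 := by
              simp [hoy]
            rw [hx, hy] at hlt
            have hlt' : os.idxOf y < os.idxOf x := by omega
            by_cases hmem : o ∈ y :: t
            · have : o ∈ x :: y :: t := List.mem_cons_of_mem _ hmem
              simp [pickA, this, hmem]
            · have : o ∉ x :: y :: t := by
                simp only [List.mem_cons] at hmem ⊢; tauto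
              simp [pickA, this, hmem, (ih).1 hlt']
      · intro hle
        by_cases hox : o = x
        · subst hox
          simp [pickA, List.mem_cons]
        · by_cases hoy : o = y
          · subst hoy
            have hx : (o :: os).idxOf x = os.idxOf x + 1 := by
              simp [hox]
            have hy : (o :: os).idxOf o = 0 := by simp
            rw [hx, hy] at hle
            omega
          · have hx : (o :: os).idxOf x = os.idxOf x + 1 := by
              simp [hox]
            have hy : (o :: os).idxOf y = os.idxOf y + 1 := by
              simp [hoy]
            rw [hx, hy] at hle
            have hle' : os.idxOf x ≤ os.idxOf y := by omega
            by_cases hmem : o ∈ x :: t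
            · have h2 : o ∈ x :: y :: t := by
                simp only [List.mem_cons] at hmem ⊢; tauto
              simp [pickA, h2, hmem]
            · have h2 : o ∉ x :: y :: t := by
                simp only [List.mem_cons] at hmem hoy ⊢
                tauto
              simp [pickA, h2, hmem, (ih).2 hle']

theorem pickA_eq_foldl (order : List String) (t : List String) (x : String) :
    pickA order (x :: t)
      = t.foldl (fun b y => if order.idxOf y < order.idxOf b then y else b) x := by
  induction t generalizing x with
  | nil => simpa using pickA_singleton order x
  | cons y t ih =>
      simp only [List.foldl]
      by_cases h : order.idxOf y < order.idxOf x
      · rw [if_pos h, ← ih y, (pickA_step order x y t).1 h]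
      · rw [if_neg h, ← ih x, (pickA_step order x y t).2 (by omega)]

theorem minB_eq_pickA (x : String) (t : List String) :
    (match PySem.List.min? (x :: t) (fun p => pvOrderIndex.getD p 8) with
      | some m => m
      | none => "") = pickA pvOrder (x :: t) := by
  rw [min?_cons, pickA_eq_foldl]
  have hf : (fun (b y : String) => if pvOrderIndex.getD y 8 < pvOrderIndex.getD b 8 then y else b)
      = fun b y => if pvOrder.idxOf y < pvOrder.idxOf b then y else b := by
    funext b y
    simp [key_eq, Nat.cast_lt]
  rw [hf]

-- ===== VERDICT (by name: the statement is the Claim_ definition above) =====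
theorem select_audio_provider_spec : Claim_equal_select_audio_provider := by
  intro req avail _ hpre
  obtain ⟨hne, hreq⟩ := hpre
  unfold Spec_select_audio_provider select_audio_provider select_audio_provider_alt
  obtain ⟨x, t, rfl⟩ : ∃ x t, avail = x :: t := by
    cases avail with
    | nil => exact absurd rfl hne
    | cons a b => exact ⟨a, b, rfl⟩
  cases req with
  | none => simpa using (minB_eq_pickA x t).symm
  | some s =>
      by_cases hs : s = "" <;> simp [hs, (minB_eq_pickA x t).symm]
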